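-- pv_equiv track=rewrite | github.com/YalcinkayaE/CIX | src/ingestion.py | _extract_sha256
-- ===== SOURCE A (Python) =====
-- from typing import Any, Dict, List, Optional
--
-- def _extract_sha256(hashes: Optional[str]) -> Optional[str]:
--     if not hashes or not isinstance(hashes, str):
--         return None
--     parts = hashes.split(",")
--     for part in parts:
--         chunk = part.strip()
--         if chunk.upper().startswith("SHA256="):
--             return chunk.split("=", 1)[1].strip()
--     return None
-- ===== SOURCE B (Python) =====
-- from typing import Optional
--
-- def _extract_sha256(hashes: Optional[str]) -> Optional[str]:
--     if not hashes or not isinstance(hashes, str):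
--         return None
--     table = {}
--     for part in hashes.split(","):
--         chunk = part.strip()
--         if "=" in chunk:
--             key, value = chunk.split("=", 1)
--             k = key.upper()
--             if k not in table:
--                 table[k] = value.strip()
--     return table.get("SHA256")
-- ===== Notes on version B (the rewrite author's own statement) =====
-- stated objective: alternative
-- what changed: Replaces the early-return scan for a 'SHA256=' prefix by building a full key->value table (first occurrence per upper-cased key, parsed via split('=',1)) and finishing with a single dict lookup of 'SHA256'.
import Mathlib
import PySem

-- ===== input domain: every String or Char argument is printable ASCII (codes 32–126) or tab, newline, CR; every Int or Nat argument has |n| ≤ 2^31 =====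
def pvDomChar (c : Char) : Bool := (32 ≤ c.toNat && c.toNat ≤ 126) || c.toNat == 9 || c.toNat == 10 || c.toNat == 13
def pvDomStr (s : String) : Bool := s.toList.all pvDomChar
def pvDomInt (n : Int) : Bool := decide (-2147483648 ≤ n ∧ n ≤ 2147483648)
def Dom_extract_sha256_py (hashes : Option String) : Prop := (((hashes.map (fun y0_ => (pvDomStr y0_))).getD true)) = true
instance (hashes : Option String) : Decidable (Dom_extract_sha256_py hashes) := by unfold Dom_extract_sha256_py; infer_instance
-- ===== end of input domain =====

-- B replaces A's early-return prefix scan by building a first-occurrence key->value table and one final dict lookup; same cost, alternative structure.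

-- ===== PORT A =====
-- the for-loop of A: returns at the first chunk whose upper-cased form starts with "SHA256="
def extractA_loop : List String → Option String
  | [] => none
  | part :: rest =>
    let chunk := PySem.Str.strip part
    if PySem.Str.startswith (PySem.Str.upper chunk) "SHA256=" then
      -- chunk.split("=", 1)[1]: the startswith guard guarantees index 1 exists; '.getD ""' only totalizes pyGet?
      some (PySem.Str.strip ((PySem.List.pyGet? ((PySem.Str.splitMax? chunk "=" 1).getD []) 1).getD ""))
    else extractA_loop rest

def extract_sha256_py (hashes : Option String) : Option String :=
  match hashes with
  | none => none
  | some s =>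
    if s = "" then none   -- 'not hashes'
    else extractA_loop ((PySem.Str.split? s ",").getD [])  -- sep "," ≠ "", so split? is always some

-- ===== PORT B =====
-- the for-loop of B: builds the table, keeping the FIRST occurrence per upper-cased key
def buildTable : List String → PySem.Dict String String → PySem.Dict String String
  | [], d => d
  | part :: rest, d =>
    let chunk := PySem.Str.strip part
    if PySem.Str.isIn "=" chunk then
      -- "key, value = chunk.split('=', 1)": the '=' guard guarantees exactly two pieces
      let pieces := (PySem.Str.splitMax? chunk "=" 1).getD []
      let key := pieces.getD 0 ""
      let value := pieces.getD 1 ""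
      let k := PySem.Str.upper key
      if d.contains k then buildTable rest d
      else buildTable rest (d.insert k (PySem.Str.strip value))
    else buildTable rest d

def extract_sha256_py_alt (hashes : Option String) : Option String :=
  match hashes with
  | none => none
  | some s =>
    if s = "" then none
    else (buildTable ((PySem.Str.split? s ",").getD []) PySem.Dict.empty).get? "SHA256"

-- ===== PRECONDITION & SPEC =====
def Spec_extract_sha256_py (hashes : Option String) (out : Option String) : Prop := out = extract_sha256_py_alt hashes
instance (hashes : Option String) (out : Option String) : Decidable (Spec_extract_sha256_py hashes out) := by unfold Spec_extract_sha256_py; infer_instance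

-- ===== CLAIM (what is proved, stated in full; the proofs are below) =====
def Claim_equal_extract_sha256_py : Prop := ∀ (hashes : Option String), Dom_extract_sha256_py hashes → Spec_extract_sha256_py hashes (extract_sha256_py hashes)

-- ===== LEMMAS AND PROOFS =====

-- "=" in chunk ↔ '=' is a member of its characters
lemma isIn_eq_mem (cs : List Char) : PySem.Chars.isIn ['='] cs = true ↔ '=' ∈ cs := by
  unfold PySem.Chars.isIn
  rw [bne_iff_ne, ne_eq, ← ne_eq, PySem.Chars.find_ne_neg_one_iff]
  constructor
  · intro h; exact List.singleton_sublist.mp h.sublist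
  · intro h
    obtain ⟨s, t, rfl⟩ := List.append_of_mem h
    exact ⟨s, t, by simp⟩

-- upperChar fixes '=' and no other character maps to it
lemma upperChar_eq_iff (c : Char) : PySem.Chars.upperChar c = '=' ↔ c = '=' := by
  unfold PySem.Chars.upperChar PySem.Chars.islower
  split_ifs with h
  · simp only [Bool.and_eq_true, decide_eq_true_eq] at h
    obtain ⟨ha, hb⟩ := h
    rw [Char.le_def] at ha hb
    have h1 : 97 ≤ c.toNat := UInt32.le_iff_toNat_le.mp ha
    have h2 : c.toNat ≤ 122 := UInt32.le_iff_toNat_le.mp hb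
    have hv : (c.toNat - 32).isValidChar := Or.inl (by omega)
    have ht : (Char.ofNat (c.toNat - 32)).toNat = c.toNat - 32 := by
      rw [Char.toNat_ofNat, if_pos hv]
    constructor
    · intro he
      have := congrArg Char.toNat he
      rw [ht] at this
      have h61 : ('=' : Char).toNat = 61 := by decide
      omega
    · intro hc; subst hc; exact absurd h1 (by decide)
  · exact Iff.rfl

-- a pattern with no '=' followed by '=' prefixes the upper-cased string iff
-- there IS an '=' and the upper-cased part before the first '=' is the pattern
lemma prefix_aux (p : List Char) (hp : '=' ∉ p) : ∀ cs : List Char,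
    ((p ++ ['=']).isPrefixOf (cs.map PySem.Chars.upperChar) = true ↔
      ('=' ∈ cs ∧ (cs.takeWhile (· ≠ '=')).map PySem.Chars.upperChar = p)) := by
  induction p with
  | nil =>
    intro cs
    cases cs with
    | nil => simp
    | cons c rest =>
      have hup : PySem.Chars.upperChar '=' = '=' := by decide
      by_cases hc : c = '='
      · subst hc
        simp [List.isPrefixOf, hup]
      · simp [List.isPrefixOf, hc, Ne.symm hc]
        exact fun h => hc ((upperChar_eq_iff c).mp h.symm)
  | cons a p' ih =>
    intro cs
    have ha : a ≠ '=' := fun h => hp (h ▸ List.mem_cons_self)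
    have hp' : '=' ∉ p' := fun h => hp (List.mem_cons_of_mem _ h)
    cases cs with
    | nil => simp
    | cons c rest =>
      by_cases hc : c = '='
      · subst hc
        have : PySem.Chars.upperChar '=' = '=' := by decide
        simp [List.isPrefixOf, this]
        exact fun h => absurd h ha
      · simp [List.isPrefixOf, hc, ih hp' rest]
        tauto

-- the crux, at the character level: A's condition ≡ "there is an '=' and the upper-cased key is SHA256"
lemma cond_iff (cs : List Char) :
    PySem.Chars.startswith (PySem.Chars.upper cs) ("SHA256=".toList) = true ↔
      ('=' ∈ cs ∧ PySem.Chars.upper (cs.takeWhile (· ≠ '=')) = "SHA256".toList) := by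
  have h : ("SHA256=".toList) = ("SHA256".toList ++ ['=']) := by decide
  have hp : '=' ∉ "SHA256".toList := by decide
  unfold PySem.Chars.startswith PySem.Chars.upper
  rw [h]; exact prefix_aux _ hp cs

-- splitOnMax.go with maxsplit exhausted copies the rest as the last piece
lemma go_zero (sep : List Char) (fuel : ℕ) (l cur : List Char) (acc : List (List Char)) :
    PySem.Chars.splitOnMax.go sep fuel 0 l cur acc = ((cur.reverse ++ l) :: acc).reverse := by
  cases fuel with
  | zero => rfl
  | succ f => cases l with
    | nil => simp [PySem.Chars.splitOnMax.go]
    | cons c rest => simp [PySem.Chars.splitOnMax.go]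

-- splitOnMax.go for sep "=" with one split left: split at the first '='
lemma go_one (l : List Char) : ∀ (fuel : ℕ) (cur : List Char) (acc : List (List Char)),
    l.length ≤ fuel →
    PySem.Chars.splitOnMax.go ['='] fuel 1 l cur acc =
      (if '=' ∈ l then ((l.dropWhile (· ≠ '=')).tail) :: (cur.reverse ++ l.takeWhile (· ≠ '=')) :: acc
       else (cur.reverse ++ l) :: acc).reverse := by
  induction l with
  | nil =>
    intro fuel cur acc _
    cases fuel with
    | zero => simp [PySem.Chars.splitOnMax.go]
    | succ f => simp [PySem.Chars.splitOnMax.go]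
  | cons c rest ih =>
    intro fuel cur acc hle
    cases fuel with
    | zero => simp at hle
    | succ f =>
      by_cases hc : c = '='
      · subst hc
        simp [PySem.Chars.splitOnMax.go, List.isPrefixOf, go_zero, List.dropWhile, List.takeWhile]
      · have hpre : List.isPrefixOf ['='] (c :: rest) = false := by
          simp [List.isPrefixOf]; exact fun h => absurd h.symm hc
        have hstep : PySem.Chars.splitOnMax.go ['='] (f+1) 1 (c :: rest) cur acc =
            PySem.Chars.splitOnMax.go ['='] f 1 rest (c :: cur) acc := by
          simp [PySem.Chars.splitOnMax.go, hpre]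
        rw [hstep, ih f (c :: cur) acc (by simpa using Nat.le_of_succ_le_succ hle)]
        simp [hc, Ne.symm hc]

-- characterization of chunk.split("=", 1) at the character level
lemma splitMax_eq (cs : List Char) :
    PySem.Chars.splitOnMax cs ['='] 1 =
      if '=' ∈ cs then [cs.takeWhile (· ≠ '='), (cs.dropWhile (· ≠ '=')).tail] else [cs] := by
  unfold PySem.Chars.splitOnMax
  rw [if_neg (by norm_num)]
  rw [show ((1:ℤ).toNat) = 1 from rfl, go_one cs (cs.length + 1) [] [] (by omega)]
  split_ifs <;> simp

-- String-level bridges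
lemma isIn_str (chunk : String) : PySem.Str.isIn "=" chunk = true ↔ '=' ∈ chunk.toList := by
  have h1 : PySem.Str.isIn "=" chunk = PySem.Chars.isIn ['='] chunk.toList := rfl
  rw [h1]; exact isIn_eq_mem chunk.toList

lemma pieces_eq (chunk : String) (h : '=' ∈ chunk.toList) :
    (PySem.Str.splitMax? chunk "=" 1).getD [] =
      [String.ofList (chunk.toList.takeWhile (· ≠ '=')),
       String.ofList ((chunk.toList.dropWhile (· ≠ '=')).tail)] := by
  unfold PySem.Str.splitMax? PySem.Chars.splitMax?
  rw [if_neg (by simp [show ("=".toList) = ['='] from rfl])]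
  simp [show ("=".toList) = ['='] from rfl, splitMax_eq, h]

lemma cond_str (chunk : String) :
    PySem.Str.startswith (PySem.Str.upper chunk) "SHA256=" = true ↔
      ('=' ∈ chunk.toList ∧
        PySem.Str.upper (String.ofList (chunk.toList.takeWhile (· ≠ '='))) = "SHA256") := by
  have h1 : PySem.Str.startswith (PySem.Str.upper chunk) "SHA256=" =
      PySem.Chars.startswith (PySem.Chars.upper chunk.toList) ("SHA256=".toList) := by
    unfold PySem.Str.startswith PySem.Str.upper
    simp
  rw [h1, cond_iff]
  constructor
  · rintro ⟨hm, hu⟩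
    refine ⟨hm, ?_⟩
    unfold PySem.Str.upper
    rw [String.toList_ofList, hu]
    rfl
  · rintro ⟨hm, hu⟩
    refine ⟨hm, ?_⟩
    unfold PySem.Str.upper at hu
    have := congrArg String.toList hu
    simpa using this

-- the loop invariant: SHA256 looked up in the table built over parts is the value
-- already in the table, else the result of A's first-match scan of parts
lemma loop_lemma (parts : List String) : ∀ (d : PySem.Dict String String), d.keys.Nodup →
    (buildTable parts d).get? "SHA256" =
      ((d.get? "SHA256").orElse (fun _ => extractA_loop parts)) := by
  induction parts with
  | nil =>
    intro d _
    cases h : d.get? "SHA256" <;> simp [buildTable, extractA_loop, h, Option.orElse]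
  | cons part rest ih =>
    intro d hnd
    set chunk := PySem.Str.strip part with hchunk
    by_cases hmem : '=' ∈ chunk.toList
    · -- B enters the '=' branch
      have hIn : PySem.Str.isIn "=" chunk = true := (isIn_str chunk).mpr hmem
      have hp := pieces_eq chunk hmem
      simp only [ne_eq, decide_not] at hp
      by_cases hkey : PySem.Str.upper (String.ofList (chunk.toList.takeWhile (· ≠ '='))) = "SHA256"
      · -- the key is SHA256: A's condition holds
        have hcond : PySem.Str.startswith (PySem.Str.upper chunk) "SHA256=" = true :=
          (cond_str chunk).mpr ⟨hmem, hkey⟩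
        have hB : buildTable (part :: rest) d =
            (if d.contains "SHA256" then buildTable rest d
             else buildTable rest (d.insert "SHA256"
               (PySem.Str.strip (String.ofList ((chunk.toList.dropWhile (· ≠ '=')).tail))))) := by
          have hkey' := hkey
          simp only [ne_eq, decide_not] at hkey'
          simp only [buildTable, ← hchunk, hIn, if_true, hp]
          simp only [List.getD_cons_zero, List.getD_cons_succ, hkey']
          simp only [ne_eq, decide_not]
        have hA : extractA_loop (part :: rest) =
            some (PySem.Str.strip (String.ofList ((chunk.toList.dropWhile (· ≠ '=')).tail))) := by
          simp only [extractA_loop, ← hchunk, hcond, if_true, hp]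
          simp [PySem.List.pyGet?, PySem.List.pyIdx?]
        rw [hB, hA]
        by_cases hc : d.contains "SHA256"
        · have hsome : ∃ v, d.get? "SHA256" = some v := by
            have := PySem.Dict.contains_eq_isSome_get? (d := d) (k := "SHA256")
            rw [hc] at this
            exact Option.isSome_iff_exists.mp this.symm
          obtain ⟨v, hv⟩ := hsome
          rw [if_pos hc, ih d hnd, hv]
          simp [Option.orElse]
        · rw [if_neg hc, ih _ (PySem.Dict.nodup_keys_insert _ _ _ hnd)]
          have hget : d.get? "SHA256" = none := by
            rw [PySem.Dict.get?_eq_none_iff_contains]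
            simpa using hc
          simp [PySem.Dict.get?_insert_self, hget, Option.orElse]
      · -- the key is not SHA256: A's condition fails, B touches another key (or skips)
        have hcond : PySem.Str.startswith (PySem.Str.upper chunk) "SHA256=" = false := by
          rw [Bool.eq_false_iff]
          intro h
          exact hkey ((cond_str chunk).mp h).2
        have hA : extractA_loop (part :: rest) = extractA_loop rest := by
          simp only [extractA_loop, ← hchunk, hcond]
          simp
        have hkne : PySem.Str.upper ((((PySem.Str.splitMax? chunk "=" 1).getD []).getD 0 "")) ≠ "SHA256" := by
          rw [hp]; simpa using hkey
        rw [hA]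
        simp only [buildTable, ← hchunk, hIn, if_true]
        by_cases hc : d.contains (PySem.Str.upper ((((PySem.Str.splitMax? chunk "=" 1).getD []).getD 0 "")))
        · rw [if_pos hc]; exact ih d hnd
        · rw [if_neg hc, ih _ (PySem.Dict.nodup_keys_insert _ _ _ hnd)]
          rw [PySem.Dict.get?_insert_of_ne _ _ (Ne.symm hkne)]
    · -- no '=': both sides skip the part
      have hIn : PySem.Str.isIn "=" chunk = false := by
        rw [Bool.eq_false_iff]; intro h; exact hmem ((isIn_str chunk).mp h)
      have hcond : PySem.Str.startswith (PySem.Str.upper chunk) "SHA256=" = false := by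
        rw [Bool.eq_false_iff]; intro h; exact hmem ((cond_str chunk).mp h).1
      have hA : extractA_loop (part :: rest) = extractA_loop rest := by
        simp only [extractA_loop, ← hchunk, hcond]; simp
      have hB : buildTable (part :: rest) d = buildTable rest d := by
        simp only [buildTable, ← hchunk, hIn]; simp
      rw [hA, hB]; exact ih d hnd

-- ===== VERDICT (by name: the statement is the Claim_ definition above) =====
theorem extract_sha256_py_spec : Claim_equal_extract_sha256_py := by
  intro hashes _
  unfold Spec_extract_sha256_py
  match hashes with
  | none => rfl
  | some s =>
    simp only [extract_sha256_py, extract_sha256_py_alt]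
    by_cases hs : s = ""
    · simp [hs]
    · rw [if_neg hs, if_neg hs,
        loop_lemma _ PySem.Dict.empty (by simp [PySem.Dict.keys_empty])]
      simp [PySem.Dict.get?_empty, Option.orElse]
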